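-- pv_equiv track=rewrite | github.com/johsieders/programmieren-mit-python | samples/src/search/queens.py | nextPositions
-- ===== SOURCE A (Python) =====
-- def nextPositions(n, state):
--     """ liefert die Menge der sicheren Positionen in der naechsten Zeile.
--
--         Beispiel: state = [3, 0] bedeutet:
--         In Zeile 0 steht eine Koenigin auf Position 3
--         in Zeile 1 steht eine Koenigin auf Position 0
--         Sicher sind in Zeile 2 die Positionen 2, 4
--         Ergebnis mit n = 5: [2, 4]
--     """
--
--     offlimits = set()
--     k = len(state)
--     for i in range(k):
--         offlimits.add(state[i] - k + i)
--         offlimits.add(state[i])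
--         offlimits.add(state[i] + k - i)
--
--     return set(range(n)) - offlimits
-- ===== SOURCE B (Python) =====
-- def nextPositions(n, state):
--     k = len(state)
--     return {j for j in range(n)
--             if all(j != s and abs(j - s) != k - i for i, s in enumerate(state))}
-- ===== Notes on version B (the rewrite author's own statement) =====
-- stated objective: alternative
-- what changed: B drops A's forbidden-column table (set of offlimits columns subtracted from range(n)) and instead tests each candidate column directly against every placed queen with a per-candidate all(...) scan over enumerate(state).
import Mathlib
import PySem

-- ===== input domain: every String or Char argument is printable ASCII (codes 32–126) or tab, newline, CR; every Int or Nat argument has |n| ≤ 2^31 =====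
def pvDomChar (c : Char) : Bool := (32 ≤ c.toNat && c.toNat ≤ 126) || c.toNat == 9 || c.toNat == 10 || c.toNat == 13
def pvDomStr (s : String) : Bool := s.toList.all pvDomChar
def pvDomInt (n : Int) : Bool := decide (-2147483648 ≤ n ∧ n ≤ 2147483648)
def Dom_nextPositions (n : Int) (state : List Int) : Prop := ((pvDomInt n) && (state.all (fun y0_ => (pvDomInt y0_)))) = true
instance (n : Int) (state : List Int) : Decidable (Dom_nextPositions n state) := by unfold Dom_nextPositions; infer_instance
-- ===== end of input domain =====

-- B replaces A's offlimits-table-then-subtract with a direct per-candidate scan over the placed queens (alternative decomposition, same results).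

-- ===== PORT A =====
-- A: build a set of forbidden columns from each queen (column and both diagonals), then set(range(n)) - offlimits.
def nextPositions (n : Int) (state : List Int) : List Int :=
  let k : Int := state.length
  let offlimits : PySem.Set Int :=
    (PySem.List.pyRange 0 k 1).foldl
      (fun s i =>
        let si := PySem.List.pyGetD state i 0   -- state[i]; i ∈ range(k) is always in range
        PySem.Set.add (PySem.Set.add (PySem.Set.add s (si - k + i)) si) (si + k - i))
      PySem.Set.empty
  PySem.Set.diff (PySem.Set.ofList (PySem.List.pyRange 0 n 1)) offlimits

-- ===== PORT B =====
-- B: {j for j in range(n) if all(j != s and abs(j - s) != k - i for i, s in enumerate(state))}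
def nextPositions_alt (n : Int) (state : List Int) : List Int :=
  let k : Int := state.length
  (PySem.List.pyRange 0 n 1).filter
    (fun j => (PySem.List.enumerate state 0).all
      (fun p => (j != p.2) && (|j - p.2| != k - p.1)))

-- ===== PRECONDITION & SPEC =====
def Spec_nextPositions (n : Int) (state : List Int) (out : List Int) : Prop := out = nextPositions_alt n state
instance (n : Int) (state : List Int) (out : List Int) : Decidable (Spec_nextPositions n state out) := by unfold Spec_nextPositions; infer_instance

-- ===== CLAIM (what is proved, stated in full; the proofs are below) =====
def Claim_equal_nextPositions : Prop := ∀ (n : Int) (state : List Int), Dom_nextPositions n state → Spec_nextPositions n state (nextPositions n state)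

-- ===== LEMMAS AND PROOFS =====

-- membership in A's offlimits accumulator
theorem mem_off_foldl (state : List Int) (k : Int) (l : List Int) (s : PySem.Set Int) (j : Int) :
    j ∈ l.foldl
      (fun s i =>
        let si := PySem.List.pyGetD state i 0
        PySem.Set.add (PySem.Set.add (PySem.Set.add s (si - k + i)) si) (si + k - i)) s ↔
    j ∈ s ∨ ∃ i ∈ l, j = PySem.List.pyGetD state i 0 - k + i ∨ j = PySem.List.pyGetD state i 0 ∨
      j = PySem.List.pyGetD state i 0 + k - i := by
  induction l generalizing s with
  | nil => simp
  | cons a t ih =>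
    simp only [List.foldl_cons, ih, PySem.Set.mem_add, List.mem_cons]
    constructor
    · rintro ((((h | h) | h) | h) | ⟨i, hi, hh⟩)
      · exact Or.inl h
      · exact Or.inr ⟨a, Or.inl rfl, Or.inl h⟩
      · exact Or.inr ⟨a, Or.inl rfl, Or.inr (Or.inl h)⟩
      · exact Or.inr ⟨a, Or.inl rfl, Or.inr (Or.inr h)⟩
      · exact Or.inr ⟨i, Or.inr hi, hh⟩
    · rintro (h | ⟨i, (rfl | hi), hh⟩)
      · exact Or.inl (Or.inl (Or.inl (Or.inl h)))
      · rcases hh with h | h | h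
        · exact Or.inl (Or.inl (Or.inl (Or.inr h)))
        · exact Or.inl (Or.inl (Or.inr h))
        · exact Or.inl (Or.inr h)
      · exact Or.inr ⟨i, hi, hh⟩

-- the three forbidden columns of one queen vs the direct safety test
theorem tri_iff (j s k m : Int) (h : m < k) :
    (j = s - k + m ∨ j = s ∨ j = s + k - m) ↔ (j = s ∨ |j - s| = k - m) := by
  rw [abs_eq (by omega : (0:Int) ≤ k - m)]
  omega

theorem nextPositions_eq (n : Int) (state : List Int) :
    nextPositions n state = nextPositions_alt n state := by
  unfold nextPositions nextPositions_alt
  dsimp only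
  rw [PySem.Set.ofList_eq_self_of_nodup _ (PySem.List.nodup_pyRange_one 0 n)]
  apply List.filter_congr
  intro j _
  rw [Bool.eq_iff_iff]
  simp only [Bool.not_eq_eq_eq_not, Bool.not_true, PySem.Set.contains_eq_listContains,
    List.contains_eq_mem, decide_eq_false_iff_not, mem_off_foldl, PySem.List.mem_pyRange_one,
    List.all_eq_true, PySem.List.mem_enumerate_iff, Bool.and_eq_true, bne_iff_ne, ne_eq]
  push Not
  constructor
  · intro h p hp
    rcases hp with ⟨m, hm, rfl⟩
    have hm' : (m : Int) < state.length := by exact_mod_cast hm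
    have h3 := h.2 m ⟨by positivity, hm'⟩
    rw [PySem.List.pyGetD_eq_getElem state 0 (by positivity) (by simpa using hm')] at h3
    simp only [Int.toNat_natCast] at h3
    have h4 := (not_iff_not.mpr (tri_iff j state[m] state.length m hm')).mp (by tauto)
    push Not at h4
    simpa using h4
  · intro h
    refine ⟨by simp [PySem.Set.empty], ?_⟩
    intro i hi
    obtain ⟨hi0, hik⟩ := hi
    rw [PySem.List.pyGetD_eq_getElem state 0 hi0 hik]
    have hlt : i.toNat < state.length := by omega
    have hi' : ((i.toNat : Nat) : Int) = i := Int.toNat_of_nonneg hi0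
    have h2 := h ((i.toNat : Int), state[i.toNat]) ⟨i.toNat, hlt, by simp⟩
    simp only at h2
    rw [hi'] at h2
    have h4 := (not_iff_not.mpr (tri_iff j state[i.toNat] state.length i (by exact_mod_cast hik))).mpr
      (by push Not; exact h2)
    push Not at h4
    exact h4

-- ===== VERDICT (by name: the statement is the Claim_ definition above) =====
theorem nextPositions_spec : Claim_equal_nextPositions := by
  intro n state _
  unfold Spec_nextPositions
  exact nextPositions_eq n state
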